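-- pv_equiv track=rewrite | github.com/theaayushstha1/COSC_352_FALL_2025 | amyra_harry/project3/html_table_to_csv.py | find_all_tables
-- ===== SOURCE A (Python) =====
-- def find_all_tables(html):
--     """Find <table>...</table> blocks in HTML (case-insensitive)."""
--     tables = []
--     pos = 0
--     html_lower = html.lower()
--     while True:
--         start = html_lower.find("<table", pos)
--         if start == -1:
--             break
--         end = html_lower.find("</table>", start)
--         if end == -1:
--             break
--         tables.append(html[start:end+8])
--         pos = end + 8
--     return tables
-- ===== SOURCE B (Python) =====
-- def find_all_tables(html):
--     """Find <table>...</table> blocks in HTML (case-insensitive).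
--
--     Index-list approach: precompute all occurrence positions of the open and
--     close markers in one pass each, then pair them up with a two-pointer sweep.
--     """
--     low = html.lower()
--     opens = [i for i in range(len(low)) if low.startswith("<table", i)]
--     closes = [i for i in range(len(low)) if low.startswith("</table>", i)]
--     tables = []
--     pos = 0
--     ci = 0
--     for s in opens:
--         if s < pos:
--             continue
--         while ci < len(closes) and closes[ci] < s:
--             ci += 1
--         if ci == len(closes):
--             break
--         e = closes[ci]
--         tables.append(html[s:e + 8])
--         pos = e + 8
--     return tables
-- ===== Notes on version B (the rewrite author's own statement) =====
-- stated objective: alternative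
-- what changed: A interleaves repeated str.find calls in a while loop that re-scans from a moving cursor; B first materialises the two full lists of marker positions (all '<table' and all '</table>' occurrences) and then pairs them with a two-pointer sweep over those index lists.
import Mathlib
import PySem

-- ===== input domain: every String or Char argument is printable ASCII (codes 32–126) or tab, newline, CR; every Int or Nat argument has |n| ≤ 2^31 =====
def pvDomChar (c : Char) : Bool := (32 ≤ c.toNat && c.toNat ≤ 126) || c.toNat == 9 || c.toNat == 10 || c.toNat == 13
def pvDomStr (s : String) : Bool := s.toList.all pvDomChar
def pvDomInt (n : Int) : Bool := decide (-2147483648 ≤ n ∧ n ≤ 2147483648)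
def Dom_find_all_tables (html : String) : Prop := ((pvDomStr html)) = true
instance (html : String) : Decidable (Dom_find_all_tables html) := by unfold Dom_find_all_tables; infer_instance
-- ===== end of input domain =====

-- B replaces A's cursor-driven repeated str.find loop by precomputed marker-position lists paired with a two-pointer sweep; same results, similar cost (objective: alternative).

-- ===== PORT A =====
-- A's 'while True' loop; the fuel guard (low.length + 1) only makes the same
-- computation total: each iteration moves pos from a value ≤ low.length to a
-- strictly larger value ≤ low.length, so the fuel is never exhausted.
def findTablesLoopA (html : String) (low : List Char) (fuel : Nat) (pos : Int) : List String :=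
  match fuel with
  | 0 => []
  | fuel + 1 =>
    let start := PySem.Chars.findFrom low "<table".toList pos none
    if start = -1 then []
    else
      let e := PySem.Chars.findFrom low "</table>".toList start none
      if e = -1 then []
      else
        PySem.Str.slice html (some start) (some (e + 8)) ::
          findTablesLoopA html low fuel (e + 8)

def find_all_tables (html : String) : List String :=
  let low := PySem.Chars.lower html.toList   -- html.lower(), on code points
  findTablesLoopA html low (low.length + 1) 0

-- ===== PORT B =====
-- [i for i in range(len(low)) if low.startswith(sub, i)]
-- (low.startswith(sub, i) is ported as startswith on the drop; exact for 0 ≤ i ≤ len)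
def occIdx (low sub : List Char) : List Nat :=
  (List.range low.length).filter (fun i => PySem.Chars.startswith (List.drop i low) sub)

-- the 'for s in opens' two-pointer pairing loop of B (ci's advance = dropWhile)
def pairTables (html : String) (os cs : List Nat) (pos : Nat) : List String :=
  match os with
  | [] => []
  | s :: os' =>
    if s < pos then pairTables html os' cs pos
    else
      match cs.dropWhile (fun e => decide (e < s)) with
      | [] => []
      | e :: cs' =>
        PySem.Str.slice html (some (s : Int)) (some ((e : Int) + 8)) ::
          pairTables html os' (e :: cs') (e + 8)

def find_all_tables_alt (html : String) : List String :=
  let low := PySem.Chars.lower html.toList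
  pairTables html (occIdx low "<table".toList) (occIdx low "</table>".toList) 0

-- ===== PRECONDITION & SPEC =====
def Spec_find_all_tables (html : String) (out : List String) : Prop := out = find_all_tables_alt html
instance (html : String) (out : List String) : Decidable (Spec_find_all_tables html out) := by unfold Spec_find_all_tables; infer_instance

-- ===== CLAIM (what is proved, stated in full; the proofs are below) =====
def Claim_equal_find_all_tables : Prop := ∀ (html : String), Dom_find_all_tables html → Spec_find_all_tables html (find_all_tables html)

-- ===== LEMMAS AND PROOFS =====

theorem mem_occIdx {low sub : List Char} {i : Nat} :
    i ∈ occIdx low sub ↔ i < low.length ∧ sub <+: List.drop i low := by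
  simp [occIdx, List.mem_filter, List.mem_range, PySem.Chars.startswith_iff]

theorem occIdx_pairwise (low sub : List Char) : (occIdx low sub).Pairwise (· < ·) :=
  (List.pairwise_lt_range).filter _

-- head of dropWhile (< k) is the least element ≥ k of a strictly increasing list
theorem dropWhile_lt_eq_cons :
    ∀ (l : List Nat), l.Pairwise (· < ·) → ∀ (j k : Nat), j ∈ l → k ≤ j →
      (∀ i ∈ l, i < j → i < k) →
      ∃ rest, l.dropWhile (fun i => decide (i < k)) = j :: rest := by
  intro l hl j k hj hkj hmin
  induction l with
  | nil => cases hj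
  | cons a tl ih =>
    rcases List.pairwise_cons.mp hl with ⟨hpa, htl⟩
    by_cases ha : a < k
    · have hja : j ≠ a := by omega
      have hjtl : j ∈ tl := by cases hj with
        | head => omega
        | tail _ h => exact h
      rcases ih htl hjtl (fun i hi hij => hmin i (List.mem_cons_of_mem _ hi) hij) with ⟨rest, hr⟩
      exact ⟨rest, by simp [ha, hr]⟩
    · have haj : a = j := by
        cases hj with
        | head => rfl
        | tail _ h => exact absurd (hmin a (List.mem_cons_self) (hpa j h)) (by omega)
      subst haj
      exact ⟨tl, by rw [List.dropWhile_cons, if_neg (by simpa using ha)]⟩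

theorem dropWhile_dropWhile_lt :
    ∀ (l : List Nat) (k s : Nat), k ≤ s →
      (l.dropWhile (fun i => decide (i < k))).dropWhile (fun i => decide (i < s)) =
        l.dropWhile (fun i => decide (i < s)) := by
  intro l k s h
  induction l with
  | nil => rfl
  | cons a tl ih =>
    by_cases ha : a < k
    · simp [ha, show a < s by omega, ih]
    · simp [List.dropWhile_cons, ha]

-- first occurrence of sub at index ≥ k: str.find(sub, k) against B's occurrence list
theorem findFrom_occ (L sub : List Char) (hsub : sub ≠ []) (k : Nat) (hk : k ≤ L.length) :
    ((occIdx L sub).dropWhile (fun i => decide (i < k)) = [] ∧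
      PySem.Chars.findFrom L sub (k : Int) none = -1) ∨
    (∃ j rest, (occIdx L sub).dropWhile (fun i => decide (i < k)) = j :: rest ∧
      PySem.Chars.findFrom L sub (k : Int) none = (j : Int) ∧ k ≤ j ∧ j + sub.length ≤ L.length) := by
  rw [PySem.Chars.findFrom_natCast L sub k hk]
  by_cases h : PySem.Chars.find (List.drop k L) sub = -1
  · left
    refine ⟨?_, by simp [h]⟩
    rw [List.dropWhile_eq_nil_iff]
    intro x hx
    rcases mem_occIdx.mp hx with ⟨hxlen, hxpre⟩
    simp only [decide_eq_true_eq]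
    by_contra hxk
    have hkx : k ≤ x := by omega
    have hinf : sub <:+: List.drop k L := by
      have h1 : List.drop x L = List.drop (x - k) (List.drop k L) := by
        rw [List.drop_drop]; congr 1; omega
      rw [h1] at hxpre
      exact hxpre.isInfix.trans (List.drop_suffix _ _).isInfix
    exact (PySem.Chars.find_eq_neg_one_iff _ _).mp h hinf
  · right
    have h0 : 0 ≤ PySem.Chars.find (List.drop k L) sub := by
      have := PySem.Chars.neg_one_le_find (List.drop k L) sub; omega
    obtain ⟨hpre, hmin⟩ := PySem.Chars.find_spec h0
    set m := (PySem.Chars.find (List.drop k L) sub).toNat with hm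
    have hprej : sub <+: List.drop (k + m) L := by rwa [List.drop_drop] at hpre
    have hlen : sub.length ≤ (List.drop (k + m) L).length := hprej.length_le
    have hsublen : 0 < sub.length := List.length_pos_of_ne_nil hsub
    rw [List.length_drop] at hlen
    have hjlen : k + m + sub.length ≤ L.length := by omega
    have hjmem : (k + m) ∈ occIdx L sub := mem_occIdx.mpr ⟨by omega, hprej⟩
    have hminall : ∀ i ∈ occIdx L sub, i < k + m → i < k := by
      intro i hi hij
      by_contra hik
      have hki : k ≤ i := by omega
      rcases mem_occIdx.mp hi with ⟨_, hipre⟩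
      have h1 : List.drop i L = List.drop (i - k) (List.drop k L) := by
        rw [List.drop_drop]; congr 1; omega
      rw [h1] at hipre
      exact hmin (i - k) (by omega) hipre
    rcases dropWhile_lt_eq_cons (occIdx L sub) (occIdx_pairwise L sub) (k + m) k hjmem
        (by omega) hminall with ⟨rest, hr⟩
    refine ⟨k + m, rest, hr, ?_, by omega, hjlen⟩
    simp only [h, if_false]
    push_cast [hm]
    rw [Int.toNat_of_nonneg h0]

-- B's outer loop skips every open position < pos
theorem pairTables_dropWhile (html : String) :
    ∀ (os cs : List Nat) (pos : Nat),
      pairTables html (os.dropWhile (fun i => decide (i < pos))) cs pos =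
        pairTables html os cs pos := by
  intro os
  induction os with
  | nil => intro cs pos; rfl
  | cons s os' ih =>
    intro cs pos
    by_cases hs : s < pos
    · have h2 : pairTables html (s :: os') cs pos = pairTables html os' cs pos := by
        simp [pairTables, hs]
      rw [h2, ← ih, List.dropWhile_cons, if_pos (by simpa using hs)]
    · rw [List.dropWhile_cons, if_neg (by simpa using hs)]

theorem loopA_eq_pair (html : String) (L : List Char) :
    ∀ (fuel pos k : Nat), k ≤ pos → pos ≤ L.length → L.length - pos < fuel →
      findTablesLoopA html L fuel (pos : Int) =
        pairTables html ((occIdx L "<table".toList).dropWhile (fun i => decide (i < pos)))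
          ((occIdx L "</table>".toList).dropWhile (fun i => decide (i < k))) pos := by
  intro fuel
  induction fuel with
  | zero => intro pos k _ _ hf; omega
  | succ fuel ih =>
    intro pos k hkpos hpos hf
    rcases findFrom_occ L "<table".toList (by decide) pos hpos with
      ⟨hnil, hneg⟩ | ⟨s, os', hos, hfind, hps, hslen⟩
    · rw [hnil]
      simp only [findTablesLoopA, pairTables]
      rw [hneg]
      simp
    · have hsL : s ≤ L.length := le_trans (Nat.le_add_right _ _) hslen
      have hcsdrop : ((occIdx L "</table>".toList).dropWhile (fun i => decide (i < k))).dropWhile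
          (fun i => decide (i < s)) = (occIdx L "</table>".toList).dropWhile (fun i => decide (i < s)) :=
        dropWhile_dropWhile_lt _ k s (by omega)
      rcases findFrom_occ L "</table>".toList (by decide) s hsL with
        ⟨hnil2, hneg2⟩ | ⟨e, cs', hcs, hfind2, hse, helen⟩
      · rw [hos]
        simp only [findTablesLoopA, pairTables]
        rw [hfind, hneg2, if_neg (show ¬(s : Int) = -1 by omega),
          if_neg (show ¬s < pos by omega), hcsdrop, hnil2]
        simp
      · have hlen8 : "</table>".toList.length = 8 := by decide
        rw [hos]
        simp only [findTablesLoopA, pairTables]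
        rw [hfind, hfind2, if_neg (show ¬(s : Int) = -1 by omega),
          if_neg (show ¬(e : Int) = -1 by omega), if_neg (show ¬s < pos by omega), hcsdrop, hcs]
        have hcast : ((e : Int) + 8) = ((e + 8 : Nat) : Int) := by push_cast; ring
        rw [hcast, ih (e + 8) s (by omega) (by omega) (by omega)]
        congr 1
        rw [hcs]
        rw [← pairTables_dropWhile html os' (e :: cs') (e + 8)]
        congr 1
        have h1 : ((occIdx L "<table".toList).dropWhile (fun i => decide (i < pos))).dropWhile
            (fun i => decide (i < e + 8)) = (occIdx L "<table".toList).dropWhile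
            (fun i => decide (i < e + 8)) := dropWhile_dropWhile_lt _ pos (e + 8) (by omega)
        rw [hos] at h1
        rw [← h1, List.dropWhile_cons]
        simp [show s < e + 8 by omega]

-- ===== VERDICT (by name: the statement is the Claim_ definition above) =====
theorem find_all_tables_spec : Claim_equal_find_all_tables := by
  intro html _
  unfold Spec_find_all_tables find_all_tables find_all_tables_alt
  have h0 : ∀ (l : List Nat), l.dropWhile (fun i => decide (i < 0)) = l := by
    intro l; cases l <;> simp
  have h := loopA_eq_pair html (PySem.Chars.lower html.toList)
    ((PySem.Chars.lower html.toList).length + 1) 0 0 (le_refl 0) (Nat.zero_le _) (by omega)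
  rw [h0, h0] at h
  exact h
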